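-- pv_equiv track=rewrite | github.com/advika-s/Course-Registrar-Website | regdb.py | _replace_wild
-- ===== SOURCE A (Python) =====
-- def _replace_wild(query):
--     '''Takes string query as input. Replaces characters that are by
--     default treated as wildcard characters in SQL by preceding them with
--     black slash characters. Returns editted string query.
--     '''
--     i = 0
--     while i < len(query):
--         if query[i] == '%':
--             query = query[:i] + '\\' + query[i:]
--             i += 2
--         elif query[i] == '_':
--             query = query[:i] + '\\' + query[i:]
--             i += 2
--         i += 1
--     return query
-- ===== SOURCE B (Python) =====
-- def _replace_wild(query):
--     '''Escape SQL wildcard characters % and _ by preceding them with a backslash.'''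
--     return query.replace('%', '\\%').replace('_', '\\_')
-- ===== Notes on version B (the rewrite author's own statement) =====
-- stated objective: idiomatic
-- what changed: Replaces A's index-driven while loop that re-slices and rebuilds the string at every wildcard with two chained whole-string str.replace passes (escape all '%', then all '_').
-- intended difference: On strings containing two adjacent wildcard characters (% or _), A leaves the second wildcard of the pair unescaped (its i += 2 plus the loop's i += 1 skips the character after each escape, e.g. '%%' -> '\%%'), while B escapes every wildcard ('%%' -> '\%\%'), which is the function's stated purpose. — e.g. on _replace_wild("%%"): A returns "\\%%", B returns "\\%\\%"
import Mathlib
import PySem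

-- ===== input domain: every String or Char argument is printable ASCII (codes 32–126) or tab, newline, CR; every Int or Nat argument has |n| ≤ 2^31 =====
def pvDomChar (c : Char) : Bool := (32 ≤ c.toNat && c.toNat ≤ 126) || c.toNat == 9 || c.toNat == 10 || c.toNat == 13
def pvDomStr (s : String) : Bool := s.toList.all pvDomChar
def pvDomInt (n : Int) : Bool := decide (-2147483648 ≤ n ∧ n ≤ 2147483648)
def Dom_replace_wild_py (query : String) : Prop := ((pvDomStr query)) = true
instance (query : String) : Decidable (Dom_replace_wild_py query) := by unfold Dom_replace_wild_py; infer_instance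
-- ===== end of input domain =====

-- B replaces A's per-character index loop (quadratic string re-slicing) with two whole-string
-- str.replace passes; A skips the character after each escaped wildcard, B escapes all wildcards.


-- ===== PORT A =====
-- A's while loop on the character list; query[:i] + '\' + query[i:] with the Nat index
-- 0 ≤ i < len is exactly List.take i ++ '\' :: List.drop i; query[i] is query[i]? (in range here).
def pvLoopA (query : List Char) (i : Nat) : List Char :=
  if i < query.length then
    if query[i]? = some '%' then
      pvLoopA (query.take i ++ '\\' :: query.drop i) (i + 2 + 1)
    else if query[i]? = some '_' then
      pvLoopA (query.take i ++ '\\' :: query.drop i) (i + 2 + 1)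
    else
      pvLoopA query (i + 1)
  else query
termination_by query.length - i
decreasing_by
  · simp; omega
  · simp; omega
  · omega

def replace_wild_py (query : String) : String :=
  String.ofList (pvLoopA query.toList 0)

-- ===== PORT B =====
def replace_wild_py_alt (query : String) : String :=
  PySem.Str.replace (PySem.Str.replace query "%" "\\%") "_" "\\_"

-- ===== PRECONDITION & SPEC =====
-- On strings containing two adjacent wildcard characters (%, _), A returns a string in which the
-- second wildcard of such a pair is left unescaped (i += 2 plus the loop's i += 1 skips the
-- character after each escape), while B escapes every wildcard, which is the intended behaviour.
def pvHasAdjWild : List Char → Bool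
  | c :: d :: t => ((c = '%' || c = '_') && (d = '%' || d = '_')) || pvHasAdjWild (d :: t)
  | _ => false

def D_replace_wild_py (query : String) : Prop := pvHasAdjWild query.toList = true
instance (query : String) : Decidable (D_replace_wild_py query) := by
  unfold D_replace_wild_py; infer_instance

def Spec_replace_wild_py (query : String) (out : String) : Prop :=
  ¬ D_replace_wild_py query → out = replace_wild_py_alt query
instance (query : String) (out : String) : Decidable (Spec_replace_wild_py query out) := by
  unfold Spec_replace_wild_py; infer_instance

def pvDiffWitness_replace_wild_py : String := "%%"
def pvDiffWitnessOut_replace_wild_py : String × String := ("\\%%", "\\%\\%")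

-- ===== CLAIM (what is proved, stated in full; the proofs are below) =====
def Claim_unchanged_replace_wild_py : Prop :=
  ∀ (query : String), Dom_replace_wild_py query →
    Spec_replace_wild_py query (replace_wild_py query)

def Claim_changed_replace_wild_py : Prop :=
  Dom_replace_wild_py (pvDiffWitness_replace_wild_py) ∧
  D_replace_wild_py (pvDiffWitness_replace_wild_py) ∧
  replace_wild_py (pvDiffWitness_replace_wild_py) = pvDiffWitnessOut_replace_wild_py.1 ∧
  replace_wild_py_alt (pvDiffWitness_replace_wild_py) = pvDiffWitnessOut_replace_wild_py.2 ∧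
  pvDiffWitnessOut_replace_wild_py.1 ≠ pvDiffWitnessOut_replace_wild_py.2

def Claim_exact_replace_wild_py : Prop :=
  ∀ (query : String), Dom_replace_wild_py query → D_replace_wild_py query →
    replace_wild_py query ≠ replace_wild_py_alt query

-- ===== LEMMAS AND PROOFS =====

-- the escaping B performs, per character
def pvEsc (c : Char) : List Char := if c = '%' || c = '_' then ['\\', c] else [c]

-- what A's loop actually computes on the unprocessed suffix
def pvEscA : List Char → List Char
  | [] => []
  | [c] => if c = '%' || c = '_' then ['\\', c] else [c]
  | c :: d :: t => if c = '%' || c = '_' then '\\' :: c :: d :: pvEscA t else c :: pvEscA (d :: t)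

theorem pvLoopA_exit (q : List Char) (i : Nat) (h : q.length ≤ i) : pvLoopA q i = q := by
  rw [pvLoopA]; simp [Nat.not_lt.mpr h]

theorem pvLoopA_char (todo done : List Char) :
    pvLoopA (done ++ todo) done.length = done ++ pvEscA todo := by
  induction todo using pvEscA.induct generalizing done with
  | case1 =>
    have := pvLoopA_exit done done.length le_rfl
    simpa [pvEscA] using this
  | case2 c h =>
    rw [pvLoopA]
    have hget : (done ++ [c])[done.length]? = some c := by simp
    have htake : (done ++ [c]).take done.length = done := by simp
    have hdrop : (done ++ [c]).drop done.length = [c] := by simp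
    have hres : pvLoopA (done ++ '\\' :: [c]) (done.length + 2 + 1) = done ++ ['\\', c] :=
      pvLoopA_exit _ _ (by simp)
    have hi : done.length < (done ++ [c]).length := by simp
    rcases Bool.or_eq_true _ _ |>.mp h with h1 | h1 <;>
      · rw [decide_eq_true_eq] at h1
        subst h1
        simp only [hi, if_pos, hget, htake, hdrop, if_true]
        simp [hres, pvEscA]
  | case3 c h =>
    rw [pvLoopA]
    have hget : (done ++ [c])[done.length]? = some c := by simp
    have h1 : ¬ c = '%' := by intro hc; simp [hc] at h
    have h2 : ¬ c = '_' := by intro hc; simp [hc] at h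
    have hres : pvLoopA (done ++ [c]) (done.length + 1) = done ++ [c] :=
      pvLoopA_exit _ _ (by simp)
    simp [hget, h1, h2, hres, pvEscA, h]
  | case4 c d t h ih =>
    rw [pvLoopA]
    have hget : (done ++ c :: d :: t)[done.length]? = some c := by simp
    have htake : (done ++ c :: d :: t).take done.length = done := by simp
    have hdrop : (done ++ c :: d :: t).drop done.length = c :: d :: t := by simp
    have hi : done.length < (done ++ c :: d :: t).length := by simp
    have key : pvLoopA (done ++ '\\' :: c :: d :: t) (done.length + 2 + 1)
        = done ++ '\\' :: c :: d :: pvEscA t := by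
      have heq : done ++ '\\' :: c :: d :: t = (done ++ ['\\', c, d]) ++ t := by simp
      have hlen : done.length + 2 + 1 = (done ++ ['\\', c, d]).length := by simp
      rw [heq, hlen, ih (done ++ ['\\', c, d])]; simp
    rcases Bool.or_eq_true _ _ |>.mp h with h1 | h1 <;>
      · rw [decide_eq_true_eq] at h1
        subst h1
        simp only [hi, if_pos, hget, htake, hdrop, if_true]
        simp [key, pvEscA]
  | case5 c d t h ih =>
    rw [pvLoopA]
    have hget : (done ++ c :: d :: t)[done.length]? = some c := by simp
    have h1 : ¬ c = '%' := by intro hc; simp [hc] at h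
    have h2 : ¬ c = '_' := by intro hc; simp [hc] at h
    have key : pvLoopA (done ++ c :: d :: t) (done.length + 1)
        = done ++ c :: pvEscA (d :: t) := by
      have heq : done ++ c :: d :: t = (done ++ [c]) ++ d :: t := by simp
      have hlen : done.length + 1 = (done ++ [c]).length := by simp
      rw [heq, hlen, ih (done ++ [c])]; simp
    simp [hget, h1, h2, key, pvEscA, h]

theorem pvLoopA_eq (q : List Char) : pvLoopA q 0 = pvEscA q := by
  have := pvLoopA_char q []
  simpa using this

-- B's replace with a one-character pattern is a flatMap
theorem pvReplaceGo (l : List Char) (p : Char) (new acc : List Char) (fuel : Nat)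
    (h : l.length ≤ fuel) :
    PySem.Chars.replace.go [p] new fuel l acc
      = acc.reverse ++ l.flatMap (fun c => if c = p then new else [c]) := by
  induction l generalizing fuel acc with
  | nil =>
    cases fuel <;> simp [PySem.Chars.replace.go]
  | cons c t ih =>
    cases fuel with
    | zero => simp at h
    | succ f =>
      rw [PySem.Chars.replace.go]
      by_cases hc : c = p
      · subst hc
        simp only [List.isPrefixOf, BEq.rfl, Bool.true_and, List.isPrefixOf_nil_left, if_pos rfl]
        simp only [List.length_cons] at h
        rw [if_pos (by simp)]
        simp [ih (new.reverse ++ acc) f (by omega)]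
      · have : [p].isPrefixOf (c :: t) = false := by
          simp [List.isPrefixOf]; intro hpc; exact absurd hpc.symm hc
        rw [if_neg (by simp [this])]
        simp only [List.length_cons] at h
        simp [ih (c :: acc) f (by omega), hc]

theorem pvReplace_single (l : List Char) (p : Char) (new : List Char) :
    PySem.Chars.replace l [p] new
      = l.flatMap (fun c => if c = p then new else [c]) := by
  rw [PySem.Chars.replace]
  simp [pvReplaceGo l p new [] l.length (Nat.le_refl _)]

theorem pvFlatMap_assoc (l : List Char) (f g : Char → List Char) :
    (l.flatMap f).flatMap g = l.flatMap (fun c => (f c).flatMap g) := by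
  induction l with
  | nil => simp
  | cons c t ih => simp [ih]

theorem pvAlt_eq (query : String) :
    (replace_wild_py_alt query).toList = query.toList.flatMap pvEsc := by
  unfold replace_wild_py_alt
  simp only [PySem.Str.replace, String.toList_ofList]
  have h1 : ("%" : String).toList = ['%'] := rfl
  have h2 : ("\\%" : String).toList = ['\\', '%'] := rfl
  have h3 : ("_" : String).toList = ['_'] := rfl
  have h4 : ("\\_" : String).toList = ['\\', '_'] := rfl
  rw [h1, h2, h3, h4, pvReplace_single, pvReplace_single, pvFlatMap_assoc]
  have hfun : (fun c => (if c = '%' then ['\\', '%'] else [c]).flatMap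
      (fun d => if d = '_' then ['\\', '_'] else [d])) = pvEsc := by
    funext c
    by_cases hp : c = '%'
    · subst hp; simp [pvEsc]
    · by_cases hu : c = '_'
      · subst hu; simp [pvEsc]
      · simp [pvEsc, hp, hu]
  rw [hfun]

-- a string with no adjacent wildcards keeps that property when its head is dropped
theorem pvHasAdjWild_tail (d : Char) (t : List Char) (h : pvHasAdjWild (d :: t) = false) :
    pvHasAdjWild t = false := by
  cases t with
  | nil => rfl
  | cons e t' =>
    simp only [pvHasAdjWild, Bool.or_eq_false_iff] at h
    exact h.2

-- outside D_, A's escaping agrees with B's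
theorem pvEscA_eq_flatMap (l : List Char) (h : pvHasAdjWild l = false) :
    pvEscA l = l.flatMap pvEsc := by
  induction l using pvEscA.induct with
  | case1 => simp [pvEscA]
  | case2 c hc => simp [pvEscA, pvEsc, hc]
  | case3 c hc => simp [pvEscA, pvEsc, hc]
  | case4 c d t hc ih =>
    simp only [pvHasAdjWild, Bool.or_eq_false_iff, Bool.and_eq_false_iff] at h
    obtain ⟨hcd, htail⟩ := h
    have hd : (d = '%' || d = '_') = false := by
      rcases hcd with h' | h'
      · exfalso; simp [h'.1, h'.2] at hc
      · simp [h'.1, h'.2]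
    have ht : pvHasAdjWild t = false := pvHasAdjWild_tail d t htail
    have hd1 : ¬ d = '%' := by intro hx; simp [hx] at hd
    have hd2 : ¬ d = '_' := by intro hx; simp [hx] at hd
    simp [pvEscA, hc, pvEsc, hd1, hd2, ih ht]
  | case5 c d t hc ih =>
    simp only [pvHasAdjWild, Bool.or_eq_false_iff, Bool.and_eq_false_iff] at h
    simp [pvEscA, pvEsc, hc, ih h.2]

theorem pvEsc_len (c : Char) : 1 ≤ (pvEsc c).length := by
  unfold pvEsc; split <;> simp

theorem pvEsc_len_wild (c : Char) (hc : (c = '%' || c = '_') = true) :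
    (pvEsc c).length = 2 := by
  unfold pvEsc; rw [if_pos hc]; rfl

theorem pvEsc_len_tame (c : Char) (hc : ¬ (c = '%' || c = '_') = true) :
    (pvEsc c).length = 1 := by
  unfold pvEsc; rw [if_neg hc]; rfl

theorem pvEscA_len_le (l : List Char) : (pvEscA l).length ≤ (l.flatMap pvEsc).length := by
  induction l using pvEscA.induct with
  | case1 => simp [pvEscA]
  | case2 c hc => simp [pvEscA, pvEsc, hc]
  | case3 c hc => simp [pvEscA, pvEsc, hc]
  | case4 c d t hc ih =>
    have hE : pvEscA (c :: d :: t) = '\\' :: c :: d :: pvEscA t := by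
      simp [pvEscA, hc]
    have h1 := pvEsc_len d
    have h2 := pvEsc_len_wild c hc
    rw [hE, List.flatMap_cons, List.flatMap_cons]
    simp only [List.length_append, List.length_cons]
    omega
  | case5 c d t hc ih =>
    have hE : pvEscA (c :: d :: t) = c :: pvEscA (d :: t) := by
      simp [pvEscA, hc]
    have h1 := pvEsc_len_tame c hc
    rw [hE, List.flatMap_cons]
    simp only [List.length_append, List.length_cons]
    omega

theorem pvEscA_len_lt (l : List Char) (h : pvHasAdjWild l = true) :
    (pvEscA l).length < (l.flatMap pvEsc).length := by
  induction l using pvEscA.induct with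
  | case1 => simp [pvHasAdjWild] at h
  | case2 c hc => simp [pvHasAdjWild] at h
  | case3 c hc => simp [pvHasAdjWild] at h
  | case4 c d t hc ih =>
    have hE : pvEscA (c :: d :: t) = '\\' :: c :: d :: pvEscA t := by
      simp [pvEscA, hc]
    have hlc := pvEsc_len_wild c hc
    rw [hE, List.flatMap_cons, List.flatMap_cons]
    simp only [List.length_append, List.length_cons]
    by_cases hd : (d = '%' || d = '_') = true
    · have hld := pvEsc_len_wild d hd
      have hle := pvEscA_len_le t
      omega
    · have hld := pvEsc_len_tame d hd
      have hd' : (d = '%' || d = '_') = false := by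
        cases hb : (d = '%' || d = '_') with
        | true => exact absurd hb hd
        | false => rfl
      have hdt : pvHasAdjWild (d :: t) = true := by
        simp only [pvHasAdjWild, hc, hd', Bool.true_and, Bool.or_eq_true] at h
        rcases h with h | h
        · exact absurd h (by simp)
        · exact h
      have ht : pvHasAdjWild t = true := by
        cases t with
        | nil => simp [pvHasAdjWild] at hdt
        | cons e t' =>
          simp only [pvHasAdjWild, hd', Bool.false_and, Bool.false_or] at hdt
          exact hdt
      have := ih ht
      omega
  | case5 c d t hc ih =>
    have hE : pvEscA (c :: d :: t) = c :: pvEscA (d :: t) := by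
      simp [pvEscA, hc]
    have hlc := pvEsc_len_tame c hc
    have hc' : (c = '%' || c = '_') = false := by
      cases hb : (c = '%' || c = '_') with
      | true => exact absurd hb hc
      | false => rfl
    simp only [pvHasAdjWild, hc', Bool.false_and, Bool.false_or] at h
    have := ih h
    rw [hE, List.flatMap_cons]
    simp only [List.length_append, List.length_cons]
    omega

-- ===== VERDICT (by name: the statement is the Claim_ definition above) =====
theorem replace_wild_py_spec : Claim_unchanged_replace_wild_py := by
  intro query _ hnd
  unfold replace_wild_py
  have hA : pvLoopA query.toList 0 = query.toList.flatMap pvEsc := by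
    rw [pvLoopA_eq]
    exact pvEscA_eq_flatMap _ (by simpa [D_replace_wild_py] using hnd)
  have hB := pvAlt_eq query
  apply String.toList_injective
  rw [String.toList_ofList, hA, hB]

theorem replace_wild_py_changed : Claim_changed_replace_wild_py := by
  unfold Claim_changed_replace_wild_py
  refine ⟨by decide, by decide, ?_, by decide, by decide⟩
  show String.ofList (pvLoopA ("%%" : String).toList 0) = "\\%%"
  rw [pvLoopA_eq]
  decide

theorem replace_wild_py_tight : Claim_exact_replace_wild_py := by
  intro query _ hD hEq
  have h1 : (replace_wild_py query).toList = pvEscA query.toList := by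
    unfold replace_wild_py; rw [pvLoopA_eq, String.toList_ofList]
  have h2 := pvAlt_eq query
  have hlt := pvEscA_len_lt query.toList hD
  rw [hEq, h2] at h1
  rw [h1] at hlt
  exact absurd rfl (Nat.ne_of_lt hlt)
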